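-- pv_equiv track=rewrite | github.com/BTCElectrician/ohmni-oracle-v3 | services/extraction_service.py | _prioritize_architectural_tables
-- ===== SOURCE A (Python) =====
-- from typing import Dict, List, Any, Optional, Tuple
--
-- def _prioritize_architectural_tables(
--     tables: List[Dict[str, Any]]
-- ) -> List[Dict[str, Any]]:
--     """Prioritize architectural tables by type."""
--     # Prioritize tables likely to be room schedules
--     room_tables = []
--     other_tables = []
--
--     for table in tables:
--         content = table.get("content", "").lower()
--         if "room" in content or "space" in content or "finish" in content:
--             room_tables.append(table)
--         else:
--             other_tables.append(table)
--
--     return room_tables + other_tables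
-- ===== SOURCE B (Python) =====
-- from typing import Dict, List, Any
--
-- def _prioritize_architectural_tables(
--     tables: List[Dict[str, Any]]
-- ) -> List[Dict[str, Any]]:
--     """Prioritize architectural tables by type (stable sort on a 0/1 key)."""
--     return sorted(
--         tables,
--         key=lambda t: 0 if any(
--             w in t.get("content", "").lower() for w in ("room", "space", "finish")
--         ) else 1,
--     )
-- ===== Notes on version B (the rewrite author's own statement) =====
-- stated objective: idiomatic
-- what changed: Replaced the explicit two-accumulator partition loop with a single stable sort on a 0/1 key; Timsort's stability preserves A's relative order within each group.
import Mathlib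
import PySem

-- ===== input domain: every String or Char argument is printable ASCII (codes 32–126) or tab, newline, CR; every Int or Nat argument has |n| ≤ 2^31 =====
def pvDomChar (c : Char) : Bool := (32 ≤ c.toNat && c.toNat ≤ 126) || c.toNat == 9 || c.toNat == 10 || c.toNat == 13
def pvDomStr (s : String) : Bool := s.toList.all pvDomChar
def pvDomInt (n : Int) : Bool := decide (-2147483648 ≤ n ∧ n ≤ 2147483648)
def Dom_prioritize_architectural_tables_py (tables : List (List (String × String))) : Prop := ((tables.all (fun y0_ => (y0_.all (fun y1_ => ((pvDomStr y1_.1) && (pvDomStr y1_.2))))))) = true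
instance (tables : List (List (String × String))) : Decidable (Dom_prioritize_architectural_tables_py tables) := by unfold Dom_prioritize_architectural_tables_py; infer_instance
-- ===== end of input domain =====

-- B replaces A's two-accumulator partition loop with one stable sort on a 0/1 key (idiomatic; same result by stability).


-- ===== PORT A =====
-- A: one pass building two lists (room_tables, other_tables), then concatenate.
-- table.get("content", "") on the association list = first match (List.lookup), default "".
def prioritize_architectural_tables_py (tables : List (List (String × String))) : List (List (String × String)) :=
  let st := tables.foldl
    (fun (acc : List (List (String × String)) × List (List (String × String))) table =>
      let content := PySem.Str.lower ((table.lookup "content").getD "")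
      if PySem.Str.isIn "room" content || PySem.Str.isIn "space" content || PySem.Str.isIn "finish" content then
        (acc.1 ++ [table], acc.2)
      else
        (acc.1, acc.2 ++ [table]))
    ([], [])
  st.1 ++ st.2

-- ===== PORT B =====
-- B: sorted(tables, key=lambda t: 0 if any(w in t.get("content","").lower() for w in ("room","space","finish")) else 1)
def pvAltKey (t : List (String × String)) : Int :=
  if (["room", "space", "finish"].any
        (fun w => PySem.Str.isIn w (PySem.Str.lower ((t.lookup "content").getD "")))) then 0 else 1

def prioritize_architectural_tables_py_alt (tables : List (List (String × String))) : List (List (String × String)) :=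
  PySem.List.sorted tables pvAltKey

-- ===== PRECONDITION & SPEC =====
def Spec_prioritize_architectural_tables_py (tables : List (List (String × String))) (out : List (List (String × String))) : Prop := out = prioritize_architectural_tables_py_alt tables
instance (tables : List (List (String × String))) (out : List (List (String × String))) : Decidable (Spec_prioritize_architectural_tables_py tables out) := by unfold Spec_prioritize_architectural_tables_py; infer_instance

-- ===== CLAIM (what is proved, stated in full; the proofs are below) =====
def Claim_equal_prioritize_architectural_tables_py : Prop := ∀ (tables : List (List (String × String))), Dom_prioritize_architectural_tables_py tables → Spec_prioritize_architectural_tables_py tables (prioritize_architectural_tables_py tables)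

-- ===== LEMMAS AND PROOFS =====

-- A's branch test, as a Bool predicate on one table.
def pvIsRoom (t : List (String × String)) : Bool :=
  let content := PySem.Str.lower ((t.lookup "content").getD "")
  PySem.Str.isIn "room" content || PySem.Str.isIn "space" content || PySem.Str.isIn "finish" content

-- A's loop body, named for the proofs (definitionally A's step).
def pvStepA (acc : List (List (String × String)) × List (List (String × String)))
    (table : List (String × String)) :
    List (List (String × String)) × List (List (String × String)) :=
  if pvIsRoom table then (acc.1 ++ [table], acc.2) else (acc.1, acc.2 ++ [table])

lemma portA_eq_foldl (tables : List (List (String × String))) :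
    prioritize_architectural_tables_py tables
      = (tables.foldl pvStepA ([], [])).1 ++ (tables.foldl pvStepA ([], [])).2 := rfl

lemma pvAltKey_eq (t : List (String × String)) :
    pvAltKey t = if pvIsRoom t then 0 else 1 := by
  simp [pvAltKey, pvIsRoom, List.any, Bool.or_assoc]

-- Inserting an element that compares below every element of ys puts it in front.
lemma insertBy_of_forall_before {α : Type} (b : α → α → Bool) (x : α) (ys : List α)
    (h : ∀ y ∈ ys, b x y = true) : PySem.List.insertBy b x ys = x :: ys := by
  cases ys with
  | nil => rfl
  | cons z zs => simp [PySem.List.insertBy, h z (by simp)]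

lemma insertBy_append_not_before {α : Type} (b : α → α → Bool) (x : α) (r o : List α)
    (hr : ∀ y ∈ r, b x y = false) :
    PySem.List.insertBy b x (r ++ o) = r ++ PySem.List.insertBy b x o := by
  induction r with
  | nil => rfl
  | cons z zs ih =>
      simp only [List.cons_append, PySem.List.insertBy, hr z (by simp)]
      simp only [Bool.false_eq_true, if_false]
      rw [ih (fun y hy => hr y (by simp [hy]))]

-- Main invariant: folding B's insertBy (0/1 key) over l, starting from a state r ++ o
-- with r all-room and o all-other, appends each group's filter in order.
lemma foldl_insertBy_partition (l r o : List (List (String × String)))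
    (hr : ∀ y ∈ r, pvIsRoom y = true) (ho : ∀ y ∈ o, pvIsRoom y = false) :
    l.foldl (fun acc x => PySem.List.insertBy (fun a c => decide (pvAltKey a < pvAltKey c)) x acc) (r ++ o)
      = (r ++ l.filter pvIsRoom) ++ (o ++ l.filter (fun t => !pvIsRoom t)) := by
  induction l generalizing r o with
  | nil => simp
  | cons x xs ih =>
      by_cases hx : pvIsRoom x = true
      · have step : PySem.List.insertBy (fun a c => decide (pvAltKey a < pvAltKey c)) x (r ++ o)
            = (r ++ [x]) ++ o := by
          rw [insertBy_append_not_before _ _ _ _ (fun y hy => by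
            simp [pvAltKey_eq, hx, hr y hy])]
          rw [insertBy_of_forall_before _ _ _ (fun y hy => by
            simp [pvAltKey_eq, hx, ho y hy])]
          simp
        have hr' : ∀ y ∈ r ++ [x], pvIsRoom y = true := by
          intro y hy
          rcases List.mem_append.mp hy with h | h
          · exact hr y h
          · simp at h; subst h; exact hx
        simp only [List.foldl_cons, step]
        rw [ih (r ++ [x]) o hr' ho]
        simp [hx]
      · have hx' : pvIsRoom x = false := by simpa using hx
        have step : PySem.List.insertBy (fun a c => decide (pvAltKey a < pvAltKey c)) x (r ++ o)
            = r ++ (o ++ [x]) := by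
          rw [PySem.List.insertBy_of_forall_not_before _ _ _ (fun y hy => by
            rcases List.mem_append.mp hy with h | h
            · simp [pvAltKey_eq, hx', hr y h]
            · simp [pvAltKey_eq, hx', ho y h])]
          simp
        have ho' : ∀ y ∈ o ++ [x], pvIsRoom y = false := by
          intro y hy
          rcases List.mem_append.mp hy with h | h
          · exact ho y h
          · simp at h; subst h; exact hx'
        simp only [List.foldl_cons, step]
        rw [ih r (o ++ [x]) hr ho']
        simp [hx']

-- A's fold keeps its pair state as (r ++ filter room, o ++ filter other).
lemma foldlA_partition (l : List (List (String × String))) (r o : List (List (String × String))) :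
    l.foldl pvStepA (r, o)
      = (r ++ l.filter pvIsRoom, o ++ l.filter (fun t => !pvIsRoom t)) := by
  induction l generalizing r o with
  | nil => simp
  | cons x xs ih =>
      by_cases hx : pvIsRoom x = true
      · simp only [List.foldl_cons, pvStepA, hx, if_true]
        rw [ih]
        simp [hx]
      · have hx' : pvIsRoom x = false := by simpa using hx
        simp only [List.foldl_cons, pvStepA, hx', Bool.false_eq_true, if_false]
        rw [ih]
        simp [hx']

-- ===== VERDICT (by name: the statement is the Claim_ definition above) =====
theorem prioritize_architectural_tables_py_spec : Claim_equal_prioritize_architectural_tables_py := by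
  intro tables _
  unfold Spec_prioritize_architectural_tables_py
  rw [portA_eq_foldl, foldlA_partition tables [] []]
  unfold prioritize_architectural_tables_py_alt
  rw [PySem.List.sorted_eq_foldl_insertBy]
  rw [show ([] : List (List (String × String))) = ([] ++ [] : List (List (String × String))) from rfl,
     foldl_insertBy_partition tables [] [] (by simp) (by simp)]
  simp
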